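-- pv_equiv track=rewrite | github.com/Arunava800/DSA_MachineLearning | Introduction to python/2DArrays/LargestRowOrColumn.py | maximum_row
-- ===== SOURCE A (Python) =====
-- def maximum_row(mat, n_row, m_col):
--     maximum = -2147483648
--     temp = 0
--     for row in range(n_row):
--         addition = 0
--         for col in range(m_col):
--             addition += mat[row][col]
--             if maximum < addition:
--                 maximum = addition
--                 temp = row
--     return maximum, temp
-- ===== SOURCE B (Python) =====
-- def _row_best(row):
--     prefixes = []
--     total = 0
--     for x in row:
--         total += x
--         prefixes.append(total)
--     return max(prefixes)
--
--
-- def _best_row(bests):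
--     maximum, temp = -2147483648, 0
--     for r, b in enumerate(bests):
--         if maximum < b:
--             maximum, temp = b, r
--     return maximum, temp
--
--
-- def maximum_row(mat, n_row, m_col):
--     # Two-phase decomposition: per-row best-prefix table, then one argmax scan.
--     if m_col <= 0:
--         return -2147483648, 0
--     bests = [_row_best(mat[r][:m_col]) for r in range(n_row)]
--     return _best_row(bests)
-- ===== Notes on version B (the rewrite author's own statement) =====
-- stated objective: alternative
-- what changed: A's single fused double loop (global running max updated inside the column loop) is replaced by a two-phase decomposition: a per-row best-prefix-sum table built first, then a separate strict-improvement argmax scan over that table.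
import Mathlib
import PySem

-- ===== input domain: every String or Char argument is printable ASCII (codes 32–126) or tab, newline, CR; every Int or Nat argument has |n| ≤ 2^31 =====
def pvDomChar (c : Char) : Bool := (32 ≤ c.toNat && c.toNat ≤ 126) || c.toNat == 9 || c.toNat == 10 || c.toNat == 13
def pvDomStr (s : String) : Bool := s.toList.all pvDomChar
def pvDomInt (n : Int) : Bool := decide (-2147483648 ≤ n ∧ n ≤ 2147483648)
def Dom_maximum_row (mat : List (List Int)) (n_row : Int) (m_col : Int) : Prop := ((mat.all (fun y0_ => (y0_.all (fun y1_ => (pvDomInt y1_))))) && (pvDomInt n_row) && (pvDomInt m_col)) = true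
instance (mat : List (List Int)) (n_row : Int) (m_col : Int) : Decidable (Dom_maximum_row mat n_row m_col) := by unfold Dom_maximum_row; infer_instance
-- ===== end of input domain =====

-- B replaces A's fused double loop by a per-row best-prefix-sum table followed by a
-- separate strict-improvement argmax scan (alternative decomposition, same cost).

-- ===== PORT A =====
def maximum_row (mat : List (List Int)) (n_row : Int) (m_col : Int) : Int × Int :=
  (PySem.List.pyRange 0 n_row).foldl
    (fun (mt : Int × Int) row =>
      ((PySem.List.pyRange 0 m_col).foldl
        (fun (s : Int × Int × Int) col =>
          let addition := s.1 + PySem.List.pyGetD (PySem.List.pyGetD mat row []) col 0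
          if s.2.1 < addition then (addition, addition, row) else (addition, s.2))
        (0, mt)).2)
    (-2147483648, 0)

-- ===== PORT B =====
-- max(prefixes): Python raises on an empty list; the port returns a default 0 there
-- (reachable only outside Pre_maximum_row).
def pvRowBest (row : List Int) : Int :=
  let pr := row.foldl (fun (s : Int × List Int) x => (s.1 + x, s.2 ++ [s.1 + x])) (0, [])
  (PySem.List.max? pr.2 (fun y => y)).getD 0

def pvBestRow (bests : List Int) : Int × Int :=
  (PySem.List.enumerate bests).foldl
    (fun (mt : Int × Int) rb => if mt.1 < rb.2 then (rb.2, rb.1) else mt)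
    (-2147483648, 0)

def maximum_row_alt (mat : List (List Int)) (n_row : Int) (m_col : Int) : Int × Int :=
  if m_col ≤ 0 then (-2147483648, 0)
  else
    pvBestRow ((PySem.List.pyRange 0 n_row).map
      (fun r => pvRowBest (PySem.List.slice (PySem.List.pyGetD mat r []) none (some m_col))))

-- ===== PRECONDITION & SPEC =====
-- Pre_ excludes exactly the inputs where A raises IndexError: a row index below n_row
-- outside mat, or (when m_col > 0) one of the first n_row rows shorter than m_col.
def Pre_maximum_row (mat : List (List Int)) (n_row : Int) (m_col : Int) : Prop :=
  0 < m_col → (n_row ≤ (mat.length : Int) ∧ ∀ row ∈ mat.take n_row.toNat, m_col ≤ (row.length : Int))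
instance (mat : List (List Int)) (n_row : Int) (m_col : Int) : Decidable (Pre_maximum_row mat n_row m_col) := by unfold Pre_maximum_row; infer_instance

def pvWitness_maximum_row : List (List Int) × Int × Int := ([[1, -2], [3, 4]], 2, 2)

def Spec_maximum_row (mat : List (List Int)) (n_row : Int) (m_col : Int) (out : Int × Int) : Prop := out = maximum_row_alt mat n_row m_col
instance (mat : List (List Int)) (n_row : Int) (m_col : Int) (out : Int × Int) : Decidable (Spec_maximum_row mat n_row m_col out) := by unfold Spec_maximum_row; infer_instance

-- ===== CLAIM (what is proved, stated in full; the proofs are below) =====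
def Claim_equal_maximum_row : Prop := ∀ (mat : List (List Int)) (n_row : Int) (m_col : Int), Dom_maximum_row mat n_row m_col → Pre_maximum_row mat n_row m_col → Spec_maximum_row mat n_row m_col (maximum_row mat n_row m_col)

-- ===== LEMMAS AND PROOFS =====

-- prefix sums of l starting from accumulator a
def pvPref (a : Int) : List Int → List Int
  | [] => []
  | x :: xs => (a + x) :: pvPref (a + x) xs

-- the builder loop of pvRowBest produces exactly the prefix-sum list
theorem pvPref_build (l : List Int) : ∀ (a : Int) (acc : List Int),
    (l.foldl (fun (s : Int × List Int) x => (s.1 + x, s.2 ++ [s.1 + x])) (a, acc)).2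
      = acc ++ pvPref a l := by
  induction l with
  | nil => intro a acc; simp [pvPref]
  | cons x xs ih =>
      intro a acc
      simp only [List.foldl_cons, pvPref]
      rw [ih (a + x) (acc ++ [a + x])]
      simp

-- A's inner column loop, rephrased over a plain element list, is the
-- strict-improvement scan over the prefix-sum list
theorem pvInner_eq_scan (l : List Int) (r : Int) : ∀ (a M t : Int),
    (l.foldl (fun (s : Int × Int × Int) x =>
        let addition := s.1 + x
        if s.2.1 < addition then (addition, addition, r) else (addition, s.2)) (a, M, t)).2
      = (pvPref a l).foldl (fun (mt : Int × Int) p => if mt.1 < p then (p, r) else mt) (M, t) := by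
  induction l with
  | nil => intro a M t; simp [pvPref]
  | cons x xs ih =>
      intro a M t
      simp only [List.foldl_cons, pvPref]
      by_cases h : M < a + x
      · simp only [h]
        exact ih (a + x) (a + x) r
      · simp only [h]
        exact ih (a + x) M t

-- the strict-improvement scan over a nonempty list is one max comparison
theorem pvScan_eq_max (r : Int) : ∀ (xs : List Int) (x M t : Int),
    (x :: xs).foldl (fun (mt : Int × Int) p => if mt.1 < p then (p, r) else mt) (M, t)
      = if M < xs.foldl max x then (xs.foldl max x, r) else (M, t) := by
  intro xs
  induction xs with
  | nil => intro x M t; simp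
  | cons y ys ih =>
      intro x M t
      have key : (if (if M < x then (x, r) else (M, t)).1 < y then (y, r)
            else (if M < x then (x, r) else (M, t))) = (if M < max x y then (max x y, r) else (M, t)) := by
        simp only [max_def]
        split_ifs <;> simp_all <;> omega
      have lhs : ((x :: y :: ys).foldl (fun (mt : Int × Int) p => if mt.1 < p then (p, r) else mt) (M, t))
          = ((max x y :: ys).foldl (fun (mt : Int × Int) p => if mt.1 < p then (p, r) else mt) (M, t)) := by
        simp only [List.foldl_cons]
        rw [key]
      rw [lhs, ih (max x y) M t]
      simp [List.foldl_cons]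

-- with m_col > 0 and a long-enough row, A's inner column loop is one comparison
-- against the row's best prefix sum
theorem pvRow_step (l : List Int) (row m_col : Int) (hm : 0 < m_col)
    (hlen : m_col ≤ (l.length : Int)) (acc : Int × Int) :
    ((PySem.List.pyRange 0 m_col).foldl
        (fun (s : Int × Int × Int) col =>
          let addition := s.1 + PySem.List.pyGetD l col 0
          if s.2.1 < addition then (addition, addition, row) else (addition, s.2))
        (0, acc)).2
      = (if acc.1 < pvRowBest (l.take m_col.toNat) then (pvRowBest (l.take m_col.toNat), row) else acc) := by
  set l' : List Int := l.take m_col.toNat with hl'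
  have hlen' : (l'.length : Int) = m_col := by
    simp only [hl', List.length_take]
    omega
  have haccess : ∀ (s : Int × Int × Int), ∀ col ∈ PySem.List.pyRange 0 m_col,
      (fun (s : Int × Int × Int) col =>
        let addition := s.1 + PySem.List.pyGetD l col 0
        if s.2.1 < addition then (addition, addition, row) else (addition, s.2)) s col
      = (fun (s : Int × Int × Int) col =>
        let addition := s.1 + PySem.List.pyGetD l' col 0
        if s.2.1 < addition then (addition, addition, row) else (addition, s.2)) s col := by
    intro s col hcol
    rw [PySem.List.mem_pyRange_one] at hcol
    have h1 : PySem.List.pyGetD l col 0 = l[col.toNat] :=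
      PySem.List.pyGetD_eq_getElem l 0 hcol.1 (by omega)
    have h2 : PySem.List.pyGetD (List.take m_col.toNat l) col 0 = l[col.toNat] := by
      rw [PySem.List.pyGetD_eq_getElem (List.take m_col.toNat l) 0 hcol.1
        (by simp only [List.length_take]; omega)]
      exact List.getElem_take
    rw [hl']
    simp only [h1, h2]
  rw [PySem.List.foldl_congr_mem _ _ _ _ haccess, ← hlen',
    PySem.List.foldl_pyRange_zero_pyGetD' l' 0
      (fun (s : Int × Int × Int) x =>
        let addition := s.1 + x
        if s.2.1 < addition then (addition, addition, row) else (addition, s.2)) (0, acc)]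
  have hne : l' ≠ [] := by
    intro h
    rw [h] at hlen'
    simp at hlen'
    omega
  obtain ⟨p, rest, hpr⟩ := List.exists_cons_of_ne_nil hne
  rw [hpr, pvInner_eq_scan (p :: rest) row 0 acc.1 acc.2]
  have hbest : pvRowBest (p :: rest) = (pvPref (0 + p) rest).foldl max (0 + p) := by
    show (PySem.List.max?
        ((p :: rest).foldl (fun (s : Int × List Int) x => (s.1 + x, s.2 ++ [s.1 + x])) (0, [])).2
        (fun y => y)).getD 0 = _
    rw [pvPref_build (p :: rest) 0 []]
    simp only [List.nil_append, pvPref]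
    rw [PySem.List.max?_id_cons]
    rfl
  rw [show pvPref 0 (p :: rest) = (0 + p) :: pvPref (0 + p) rest from rfl,
    pvScan_eq_max row (pvPref (0 + p) rest) (0 + p) acc.1 acc.2, hbest]

theorem maximum_row_spec : Claim_equal_maximum_row := by
  intro mat n_row m_col _ hpre
  unfold Spec_maximum_row maximum_row maximum_row_alt
  by_cases hm : m_col ≤ 0
  · rw [if_pos hm, PySem.List.pyRange_one_eq_nil hm]
    simp
  · replace hm : 0 < m_col := by omega
    rw [if_neg (by omega)]
    have hBlen : PySem.List.pyRange 0 (PySem.List.len ((PySem.List.pyRange 0 n_row).map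
        (fun r => pvRowBest (PySem.List.slice (PySem.List.pyGetD mat r []) none (some m_col)))))
        = PySem.List.pyRange 0 n_row := by
      by_cases h : n_row ≤ 0
      · rw [PySem.List.pyRange_one_eq_nil h, PySem.List.pyRange_one_eq_nil (by simp [PySem.List.len])]
      · replace h : 0 < n_row := by omega
        have : PySem.List.len ((PySem.List.pyRange 0 n_row).map
            (fun r => pvRowBest (PySem.List.slice (PySem.List.pyGetD mat r []) none (some m_col)))) = n_row := by
          simp only [PySem.List.len_eq, List.length_map, PySem.List.length_pyRange_one]
          omega
        rw [this]
    rw [pvBestRow, PySem.List.enumerate_eq_map_pyRange _ 0, hBlen, List.foldl_map]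
    refine PySem.List.foldl_congr_mem _ _ _ _ ?_
    intro acc row hrow
    rw [PySem.List.mem_pyRange_one] at hrow
    obtain ⟨h0, h1⟩ := hrow
    have hrl : row < (mat.length : Int) := lt_of_lt_of_le h1 (hpre hm).1
    have hl : PySem.List.pyGetD mat row [] = mat[row.toNat]'(by omega) :=
      PySem.List.pyGetD_eq_getElem mat [] h0 hrl
    have hmem : mat[row.toNat]'(by omega) ∈ mat.take n_row.toNat := by
      have hlen2 : row.toNat < (mat.take n_row.toNat).length := by
        simp only [List.length_take]
        omega
      have := List.getElem_mem hlen2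
      rwa [List.getElem_take] at this
    have hlen : m_col ≤ ((mat[row.toNat]'(by omega) : List Int).length : Int) := (hpre hm).2 _ hmem
    rw [PySem.List.pyGetD_map_pyRange_of_nonneg _ n_row row 0 h0 h1]
    simp only [hl]
    rw [pvRow_step (mat[row.toNat]'(by omega)) row m_col hm hlen acc,
      PySem.List.slice_to _ (le_of_lt hm)]
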